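-- pv_equiv track=rewrite | github.com/nurme-ave/CheckiO | nearest_value.py | nearest_value
-- ===== SOURCE A (Python) =====
-- def nearest_value(values: set, one: int):
--     values = list(sorted(values))
--     if one in values:
--         return one
--     elif one < values[0]:
--         return values[0]
--     elif one > values[-1]:
--         return values[-1]
--     else:
--         for i in range(len(values)-1):
--             if values[i] < one < values[i + 1]:
--                 lower, upper = values[i], values[i+1]
--                 if (one - lower) > (upper - one):
--                     return upper
--                 return lower
-- ===== SOURCE B (Python) =====
-- def nearest_value(values: set, one: int):
--     arr = sorted(values)
--     lo, hi = 0, len(arr)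
--     while lo < hi:                      # bisect_left by hand (no imports in the module)
--         mid = (lo + hi) // 2
--         if arr[mid] < one:
--             lo = mid + 1
--         else:
--             hi = mid
--     if lo < len(arr) and arr[lo] == one:
--         return one
--     if lo == 0:
--         return arr[0]                   # empty input raises IndexError here, like A
--     if lo == len(arr):
--         return arr[-1]
--     lower, upper = arr[lo - 1], arr[lo]
--     if (one - lower) > (upper - one):
--         return upper
--     return lower
-- ===== Notes on version B (the rewrite author's own statement) =====
-- stated objective: alternative
-- what changed: Replaces A's linear membership test plus linear scan for the bracketing pair with a single hand-written binary search (bisect_left) on the sorted list, then decides among at most two neighbours; search cost O(log n) vs O(n) after the shared sort (total time is sort-dominated, so not measurably faster).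
import Mathlib
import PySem

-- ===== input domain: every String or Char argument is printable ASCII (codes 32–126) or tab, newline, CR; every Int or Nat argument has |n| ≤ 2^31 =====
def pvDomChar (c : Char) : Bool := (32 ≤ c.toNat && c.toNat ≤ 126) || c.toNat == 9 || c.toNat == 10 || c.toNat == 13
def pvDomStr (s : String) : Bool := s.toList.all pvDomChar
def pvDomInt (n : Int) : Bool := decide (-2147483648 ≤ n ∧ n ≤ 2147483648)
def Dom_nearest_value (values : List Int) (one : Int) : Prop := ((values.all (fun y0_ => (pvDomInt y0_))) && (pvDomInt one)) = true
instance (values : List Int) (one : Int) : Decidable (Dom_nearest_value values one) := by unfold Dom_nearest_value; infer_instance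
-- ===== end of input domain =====

-- B replaces A's linear membership test and linear bracketing scan with a hand-written
-- binary search (bisect_left) on the sorted list; return values are identical on nonempty input.

-- ===== PORT A =====
-- for i in range(len(values)-1): first i with values[i] < one < values[i+1] decides the answer
def nearest_value_loopA (vs : List Int) (one : Int) : List Int → Option Int
  | [] => none
  | i :: rest =>
      let lower := (PySem.List.pyGet? vs i).getD 0
      let upper := (PySem.List.pyGet? vs (i + 1)).getD 0
      if lower < one ∧ one < upper then
        some (if one - lower > upper - one then upper else lower)
      else nearest_value_loopA vs one rest

def nearest_value (values : List Int) (one : Int) : Int :=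
  let vs := PySem.List.sorted values (fun x => x)
  if one ∈ vs then one
  else if one < (PySem.List.pyGet? vs 0).getD 0 then (PySem.List.pyGet? vs 0).getD 0
  else if one > (PySem.List.pyGet? vs (-1)).getD 0 then (PySem.List.pyGet? vs (-1)).getD 0
  else (nearest_value_loopA vs one (PySem.List.pyRange 0 ((vs.length : Int) - 1))).getD 0

-- ===== PORT B =====
-- the `while lo < hi` binary-search loop of Source B (lo, hi are always ≥ 0 in Python too)
def nearest_value_bs (arr : List Int) (one : Int) (lo hi : Nat) : Nat :=
  if _h : lo < hi then
    let mid := (lo + hi) / 2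
    if (PySem.List.pyGet? arr (mid : Int)).getD 0 < one then nearest_value_bs arr one (mid + 1) hi
    else nearest_value_bs arr one lo mid
  else lo
termination_by hi - lo
decreasing_by
  · omega
  · omega

def nearest_value_alt (values : List Int) (one : Int) : Int :=
  let arr := PySem.List.sorted values (fun x => x)
  let lo := nearest_value_bs arr one 0 arr.length
  if lo < arr.length ∧ (PySem.List.pyGet? arr (lo : Int)).getD 0 = one then one
  else if lo = 0 then (PySem.List.pyGet? arr 0).getD 0
  else if lo = arr.length then (PySem.List.pyGet? arr (-1)).getD 0
  else
    let lower := (PySem.List.pyGet? arr ((lo : Int) - 1)).getD 0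
    let upper := (PySem.List.pyGet? arr (lo : Int)).getD 0
    if one - lower > upper - one then upper else lower

-- ===== PRECONDITION & SPEC =====
-- Pre_ excludes only the empty list, on which both A and B raise IndexError.
def Pre_nearest_value (values : List Int) (one : Int) : Prop := values ≠ []
instance (values : List Int) (one : Int) : Decidable (Pre_nearest_value values one) := by unfold Pre_nearest_value; infer_instance
def pvWitness_nearest_value : List Int × Int := ([3, 7], 5)

def Spec_nearest_value (values : List Int) (one : Int) (out : Int) : Prop := out = nearest_value_alt values one
instance (values : List Int) (one : Int) (out : Int) : Decidable (Spec_nearest_value values one out) := by unfold Spec_nearest_value; infer_instance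

-- ===== CLAIM (what is proved, stated in full; the proofs are below) =====
def Claim_equal_nearest_value : Prop := ∀ (values : List Int) (one : Int), Dom_nearest_value values one → Pre_nearest_value values one → Spec_nearest_value values one (nearest_value values one)

-- ===== LEMMAS AND PROOFS =====

theorem list_mono (arr : List Int) (hs : arr.Pairwise (· ≤ ·)) :
    ∀ i j (hi : i < arr.length) (hj : j < arr.length), i ≤ j → arr[i] ≤ arr[j] := by
  intro i j hi hj hij
  rcases Nat.lt_or_ge i j with h | h
  · exact List.pairwise_iff_getElem.mp hs i j hi hj h
  · have : i = j := by omega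
    subst this; rfl

theorem nearest_value_bs_spec (arr : List Int) (one : Int)
    (hs : arr.Pairwise (· ≤ ·)) :
    ∀ (lo hi : Nat), lo ≤ hi → hi ≤ arr.length →
    (∀ j (hj : j < arr.length), j < lo → arr[j] < one) →
    (∀ j (hj : j < arr.length), hi ≤ j → one ≤ arr[j]) →
    lo ≤ nearest_value_bs arr one lo hi ∧ nearest_value_bs arr one lo hi ≤ hi ∧
    (∀ j (hj : j < arr.length), j < nearest_value_bs arr one lo hi → arr[j] < one) ∧
    (∀ j (hj : j < arr.length), nearest_value_bs arr one lo hi ≤ j → one ≤ arr[j]) := by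
  intro lo hi
  fun_induction nearest_value_bs arr one lo hi with
  | case1 lo hi h mid hmid ih =>
    intro hlohi hhilen hL hR
    have hmlen : mid < arr.length := by simp only [mid]; omega
    have hget : (PySem.List.pyGet? arr (mid : Int)).getD 0 = arr[mid] := by
      rw [PySem.List.pyGet?_natCast, List.getElem?_eq_getElem hmlen]; rfl
    rw [hget] at hmid
    have := ih (by simp only [mid]; omega) hhilen
      (fun j hj hjlt => by
        have : arr[j] ≤ arr[mid] := list_mono arr hs j mid hj hmlen (by omega)
        exact lt_of_le_of_lt this hmid)
      hR
    refine ⟨by simp only [mid] at this ⊢; omega, by omega, this.2.2⟩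
  | case2 lo hi h mid hmid ih =>
    intro hlohi hhilen hL hR
    have hmlen : mid < arr.length := by simp only [mid]; omega
    have hget : (PySem.List.pyGet? arr (mid : Int)).getD 0 = arr[mid] := by
      rw [PySem.List.pyGet?_natCast, List.getElem?_eq_getElem hmlen]; rfl
    rw [hget] at hmid
    push_neg at hmid
    have := ih (by simp only [mid]; omega) (by omega) hL
      (fun j hj hjge => le_trans hmid (list_mono arr hs mid j hmlen hj hjge))
    exact ⟨this.1, by simp only [mid] at this ⊢; omega, this.2.2⟩
  | case3 lo hi h =>
    intro hlohi hhilen hL hR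
    exact ⟨le_refl _, by omega, hL, fun j hj hjge => hR j hj (by omega)⟩

theorem nearest_value_loopA_run (vs : List Int) (one : Int) (r : Nat)
    (hr1 : 1 ≤ r) (hrlen : r < vs.length)
    (hlt : ∀ j (hj : j < vs.length), j < r → vs[j] < one)
    (hge : vs[r]'hrlen > one) :
    ∀ (k : Nat), k ≤ r - 1 →
    nearest_value_loopA vs one (PySem.List.pyRange (k : Int) ((vs.length : Int) - 1)) =
      some (if one - vs[r-1]'(by omega) > vs[r]'hrlen - one then vs[r]'hrlen else vs[r-1]'(by omega)) := by
  suffices H : ∀ (n k : Nat), k ≤ r - 1 → r - 1 - k = n →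
      nearest_value_loopA vs one (PySem.List.pyRange (k : Int) ((vs.length : Int) - 1)) =
      some (if one - vs[r-1]'(by omega) > vs[r]'hrlen - one then vs[r]'hrlen else vs[r-1]'(by omega)) by
    intro k hk; exact H _ k hk rfl
  intro n
  induction n with
  | zero =>
    intro k hk hn
    have hkr : k = r - 1 := by omega
    subst hkr
    rw [PySem.List.pyRange_one_cons (by push_cast; omega)]
    have h1 : ((r - 1 : Nat) : Int) + 1 = ((r : Nat) : Int) := by push_cast; omega
    have glow : (PySem.List.pyGet? vs ((r - 1 : Nat) : Int)).getD 0 = vs[r-1]'(by omega) := by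
      rw [PySem.List.pyGet?_natCast, List.getElem?_eq_getElem (by omega)]; rfl
    have gup : (PySem.List.pyGet? vs (((r - 1 : Nat) : Int) + 1)).getD 0 = vs[r]'hrlen := by
      rw [h1, PySem.List.pyGet?_natCast, List.getElem?_eq_getElem hrlen]; rfl
    simp only [nearest_value_loopA, glow, gup]
    rw [if_pos ⟨hlt (r-1) (by omega) (by omega), hge⟩]
  | succ n ih =>
    intro k hk hn
    rw [PySem.List.pyRange_one_cons (by push_cast; omega)]
    have h1 : ((k : Nat) : Int) + 1 = ((k + 1 : Nat) : Int) := by push_cast; omega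
    have gup : (PySem.List.pyGet? vs (((k : Nat) : Int) + 1)).getD 0 = vs[k+1]'(by omega) := by
      rw [h1, PySem.List.pyGet?_natCast, List.getElem?_eq_getElem (by omega)]; rfl
    simp only [nearest_value_loopA, gup]
    rw [if_neg (by
      rintro ⟨-, h2⟩
      exact absurd (hlt (k+1) (by omega) (by omega)) (by omega))]
    have := ih (k+1) (by omega) (by omega)
    rw [← h1] at this
    exact this

-- ===== VERDICT (by name: the statement is the Claim_ definition above) =====
theorem nearest_value_spec : Claim_equal_nearest_value := by
  intro values one _ hpre
  unfold Spec_nearest_value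
  set s := PySem.List.sorted values (fun x => x) with hsdef
  have hA : nearest_value values one =
      (if one ∈ s then one
       else if one < (PySem.List.pyGet? s 0).getD 0 then (PySem.List.pyGet? s 0).getD 0
       else if one > (PySem.List.pyGet? s (-1)).getD 0 then (PySem.List.pyGet? s (-1)).getD 0
       else (nearest_value_loopA s one (PySem.List.pyRange 0 ((s.length : Int) - 1))).getD 0) := rfl
  have hB : nearest_value_alt values one =
      (let r := nearest_value_bs s one 0 s.length
       if r < s.length ∧ (PySem.List.pyGet? s (r : Int)).getD 0 = one then one
       else if r = 0 then (PySem.List.pyGet? s 0).getD 0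
       else if r = s.length then (PySem.List.pyGet? s (-1)).getD 0
       else
         let lower := (PySem.List.pyGet? s ((r : Int) - 1)).getD 0
         let upper := (PySem.List.pyGet? s (r : Int)).getD 0
         if one - lower > upper - one then upper else lower) := rfl
  rw [hA, hB]
  have hlen0 : 0 < s.length := by
    have h := (PySem.List.sorted_perm values (fun x => x) false).length_eq
    rw [← hsdef] at h
    have hv : 0 < values.length := List.length_pos_of_ne_nil hpre
    omega
  have hp : s.Pairwise (· ≤ ·) := by
    simpa using PySem.List.sorted_pairwise values (fun x => x)
  have getNat : ∀ (j : Nat) (hj : j < s.length),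
      (PySem.List.pyGet? s (j : Int)).getD 0 = s[j] := by
    intro j hj
    rw [PySem.List.pyGet?_natCast, List.getElem?_eq_getElem hj]; rfl
  have g0 : (PySem.List.pyGet? s 0).getD 0 = s[0]'hlen0 := by
    rw [show (0 : Int) = ((0 : Nat) : Int) from rfl, PySem.List.pyGet?_natCast,
      List.getElem?_eq_getElem hlen0]; rfl
  have glast : (PySem.List.pyGet? s (-1)).getD 0 = s[s.length - 1]'(by omega) := by
    rw [PySem.List.pyGet?_neg_one, List.getLast?_eq_getElem?,
      List.getElem?_eq_getElem (by omega)]; rfl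
  obtain ⟨hr0, hrhi, hlt, hge⟩ := nearest_value_bs_spec s one hp 0 s.length
    (by omega) (le_refl _)
    (fun j hj hj0 => absurd hj0 (by omega))
    (fun j hj hjge => absurd hjge (by omega))
  set r := nearest_value_bs s one 0 s.length with hrdef
  simp only []
  by_cases hmem : one ∈ s
  · -- one is in the sorted list: both return one
    rw [if_pos hmem]
    obtain ⟨k, hk, hkeq⟩ := List.mem_iff_getElem.mp hmem
    have hrk : r ≤ k := by
      by_contra h
      have := hlt k hk (by omega)
      omega
    have hrlen : r < s.length := lt_of_le_of_lt hrk hk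
    have hsr : s[r] = one := by
      have h1 := hge r hrlen (le_refl _)
      have h2 : s[r] ≤ s[k] := list_mono s hp r k hrlen hk hrk
      omega
    rw [if_pos ⟨hrlen, by rw [getNat r hrlen]; exact hsr⟩]
  · rw [if_neg hmem]
    rw [g0, glast]
    by_cases hlo : one < s[0]'hlen0
    · -- below the minimum: both return s[0]
      rw [if_pos hlo]
      have hrz : r = 0 := by
        by_contra h
        have := hlt 0 hlen0 (by omega)
        omega
      rw [if_neg (by
        rintro ⟨h1, h2⟩
        rw [getNat r h1] at h2
        have := list_mono s hp 0 r hlen0 h1 (Nat.zero_le r)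
        omega)]
      rw [if_pos hrz]
    · rw [if_neg hlo]
      have h0le : s[0]'hlen0 < one := by
        have : s[0]'hlen0 ≠ one := fun h => hmem (h ▸ List.getElem_mem hlen0)
        omega
      by_cases hhi : one > s[s.length - 1]'(by omega)
      · -- above the maximum: both return s[-1]
        rw [if_pos hhi]
        have hreq : r = s.length := by
          by_contra h
          have h1 := hge r (by omega) (le_refl _)
          have h2 : s[r]'(by omega) ≤ s[s.length - 1]'(by omega) :=
            list_mono s hp r (s.length - 1) (by omega) (by omega) (by omega)
          omega
        rw [if_neg (by rintro ⟨h1, -⟩; omega)]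
        rw [if_neg (by omega), if_pos hreq]
      · -- strictly inside: both decide between s[r-1] and s[r]
        rw [if_neg hhi]
        have hr1 : 1 ≤ r := by
          rcases Nat.eq_zero_or_pos r with h | h
          · have := hge 0 hlen0 (by omega)
            omega
          · omega
        have hrlen : r < s.length := by
          by_contra h
          have hr_eq : r = s.length := by omega
          have := hlt (s.length - 1) (by omega) (by omega)
          omega
        have hsr : s[r] > one := by
          have h1 := hge r hrlen (le_refl _)
          have h2 : s[r] ≠ one := fun h => hmem (h ▸ List.getElem_mem hrlen)
          omega
        have hrun := nearest_value_loopA_run s one r hr1 hrlen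
          (fun j hj hjr => hlt j hj hjr) hsr 0 (by omega)
        rw [Nat.cast_zero] at hrun
        rw [if_neg (by
          rintro ⟨h1, h2⟩
          rw [getNat r hrlen] at h2
          omega)]
        rw [if_neg (by omega), if_neg (by omega)]
        have hcast : ((r : Int) - 1) = ((r - 1 : Nat) : Int) := by push_cast [hr1]; omega
        rw [hcast, getNat (r - 1) (by omega), getNat r hrlen]
        rw [hrun, Option.getD_some]
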